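-- pv_equiv track=rewrite | github.com/MrBrantCode/unitest_baseline | mut_generate/mist_train_cf/cf_62925/solution.py | prime_cubes
-- ===== SOURCE A (Python) =====
-- def prime_cubes(numbers):
--     """
--     Generate a new list containing the cubes of prime numbers from a given list.
--
--     Args:
--     numbers (list): A list of integers.
--
--     Returns:
--     list: A new list with the cubes of the prime numbers.
--     """
--     def is_prime(n):
--         if n < 2:
--             return False
--         for i in range(2, int(n**0.5) + 1):
--             if n % i == 0:
--                 return False
--         return True
--
--     return [x**3 for x in numbers if is_prime(x)]
-- ===== SOURCE B (Python) =====
-- def prime_cubes(numbers):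
--     """Cube the primes in numbers, by precomputing a prime table up to
--     sqrt(max) once and trial-dividing each element by primes only."""
--     positives = [x for x in numbers if x >= 2]
--     if not positives:
--         return []
--     m = max(positives)
--     # r = floor(sqrt(m))
--     r = 1
--     while (r + 1) * (r + 1) <= m:
--         r += 1
--     # cross off composites up to r; sieve[i] is True exactly for primes i in [2, r]
--     sieve = [True] * (r + 1)
--     for i in range(2, r + 1):
--         for j in range(i * i, r + 1, i):
--             sieve[j] = False
--     primes = [i for i in range(2, r + 1) if sieve[i]]
--     result = []
--     for x in numbers:
--         if x >= 2:
--             ok = True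
--             for p in primes:
--                 if p * p <= x and x % p == 0:
--                     ok = False
--                     break
--             if ok:
--                 result.append(x ** 3)
--     return result
-- ===== Notes on version B (the rewrite author's own statement) =====
-- stated objective: faster
-- what changed: Instead of trial-dividing every element by all integers up to sqrt(x), B computes the maximum once, builds a composite-crossing (sieve) table up to sqrt(max) from which it lists the primes, and then tests each element by dividing by those primes only.
import Mathlib
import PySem

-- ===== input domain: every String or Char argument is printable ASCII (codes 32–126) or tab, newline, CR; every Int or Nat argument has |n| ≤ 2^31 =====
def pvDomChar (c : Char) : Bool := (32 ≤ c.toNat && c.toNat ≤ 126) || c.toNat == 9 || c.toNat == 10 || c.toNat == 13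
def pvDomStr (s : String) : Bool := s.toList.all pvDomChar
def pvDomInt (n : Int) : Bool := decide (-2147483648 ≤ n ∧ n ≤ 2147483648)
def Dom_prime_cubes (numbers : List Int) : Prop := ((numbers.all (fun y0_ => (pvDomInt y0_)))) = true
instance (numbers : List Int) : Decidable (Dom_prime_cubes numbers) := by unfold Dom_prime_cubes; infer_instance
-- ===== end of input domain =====

-- B replaces per-element trial division by all integers up to sqrt(x) with one composite-crossing
-- table up to sqrt(max) built once, after which each element is trial-divided by primes only.

-- ===== PORT A =====
-- is_prime from A: trial division over range(2, int(n**0.5) + 1).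
-- int(n**0.5) is ported as Nat.sqrt n.toNat: exact for 0 ≤ n ≤ 2^31 (double sqrt is correctly
-- rounded there, so int(n**0.5) = isqrt(n)); for n < 2 the branch returns before computing it.
def pvIsPrimeA (n : Int) : Bool :=
  if n < 2 then false
  else (PySem.List.pyRange 2 ((Nat.sqrt n.toNat : Int) + 1) 1).all
        (fun i => !(PySem.Int.mod n i == 0))

def prime_cubes (numbers : List Int) : List Int :=
  (numbers.filter (fun x => pvIsPrimeA x)).map (fun x => x ^ 3)

-- ===== PORT B =====
-- r = 1; while (r+1)*(r+1) <= m: r += 1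
def pvSqrtLoop (m r : Nat) : Nat :=
  if (r + 1) * (r + 1) ≤ m then pvSqrtLoop m (r + 1) else r
termination_by m - r
decreasing_by
  have h2 : r + 1 ≤ (r + 1) * (r + 1) := Nat.le_mul_of_pos_left _ (by omega)
  omega

-- for j in range(i*i, r+1, i): sieve[j] = False
def pvMark (r : Nat) (i : Int) (s : Array Bool) : Array Bool :=
  (PySem.List.pyRange (i * i) ((r : Int) + 1) i).foldl (fun s j => s.set! j.toNat false) s

-- sieve = [True]*(r+1); for i in range(2, r+1): <mark multiples of i>
def pvSieve (r : Nat) : Array Bool :=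
  (PySem.List.pyRange 2 ((r : Int) + 1) 1).foldl (fun s i => pvMark r i s)
    (Array.replicate (r + 1) true)

-- the inner 'for p in primes: if p*p <= x and x % p == 0: ok = False; break'
def pvIsPrimeB (primes : List Int) (x : Int) : Bool :=
  primes.all (fun p => !(decide (p * p ≤ x) && (PySem.Int.mod x p == 0)))

def prime_cubes_alt (numbers : List Int) : List Int :=
  match numbers.filter (fun x => decide (2 ≤ x)) with
  | [] => []
  | c :: rest =>
    let m : Nat := (rest.foldl max c).toNat
    let r := pvSqrtLoop m 1
    let sieve := pvSieve r
    let primes := (PySem.List.pyRange 2 ((r : Int) + 1) 1).filter (fun i => sieve[i.toNat]!)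
    numbers.foldl (fun acc x =>
      if 2 ≤ x then (if pvIsPrimeB primes x then acc ++ [x ^ 3] else acc) else acc) []

-- ===== PRECONDITION & SPEC =====
def Spec_prime_cubes (numbers : List Int) (out : List Int) : Prop := out = prime_cubes_alt numbers
instance (numbers : List Int) (out : List Int) : Decidable (Spec_prime_cubes numbers out) := by unfold Spec_prime_cubes; infer_instance

-- ===== CLAIM (what is proved, stated in full; the proofs are below) =====
def Claim_equal_prime_cubes : Prop := ∀ (numbers : List Int), Dom_prime_cubes numbers → Spec_prime_cubes numbers (prime_cubes numbers)

-- ===== LEMMAS AND PROOFS =====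

-- A's is_prime says: n ≥ 2 with no divisor d, 2 ≤ d, d*d ≤ n.
theorem pvIsPrimeA_iff (n : Int) :
    pvIsPrimeA n = true ↔ 2 ≤ n ∧ ¬ ∃ d : Int, 2 ≤ d ∧ d * d ≤ n ∧ d ∣ n := by
  unfold pvIsPrimeA
  split
  · simp; omega
  · rename_i h
    have hn : 2 ≤ n := by omega
    simp only [List.all_eq_true, PySem.List.mem_pyRange_one, Bool.not_eq_eq_eq_not,
      Bool.not_true, beq_eq_false_iff_ne, ne_eq]
    constructor
    · intro H
      refine ⟨hn, ?_⟩
      rintro ⟨d, hd2, hdd, hdvd⟩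
      have hdn : d ≤ n := le_trans (by nlinarith) hdd
      have hds : d ≤ (Nat.sqrt n.toNat : Int) := by
        have : d.toNat * d.toNat ≤ n.toNat := by
          have := Int.toNat_le_toNat hdd
          calc d.toNat * d.toNat = (d*d).toNat := by
                rw [Int.toNat_mul (by omega) (by omega)]
          _ ≤ n.toNat := this
        have := Nat.le_sqrt.mpr this
        omega
      have := H d ⟨hd2, by omega⟩
      exact this ((PySem.Int.mod_eq_zero_iff_dvd n d).mpr hdvd)
    · rintro ⟨-, H⟩ i ⟨hi2, hiu⟩ hmod
      exact H ⟨i, hi2, by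
        have : i ≤ (Nat.sqrt n.toNat : Int) := by omega
        have hii : i.toNat ≤ Nat.sqrt n.toNat := by omega
        have := Nat.le_sqrt.mp hii
        have : ((i.toNat * i.toNat : Nat) : Int) ≤ ((n.toNat : Nat) : Int) := by exact_mod_cast this
        push_cast at this
        rw [Int.toNat_of_nonneg (by omega), Int.toNat_of_nonneg (by omega)] at this
        exact this, (PySem.Int.mod_eq_zero_iff_dvd n i).mp hmod⟩

-- the while loop computes Nat.sqrt
theorem pvSqrtLoop_eq (m r : Nat) (h : r * r ≤ m) : pvSqrtLoop m r = Nat.sqrt m := by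
  unfold pvSqrtLoop
  split
  · exact pvSqrtLoop_eq m (r + 1) (by assumption)
  · have h1 : r ≤ Nat.sqrt m := Nat.le_sqrt.mpr h
    have h2 : Nat.sqrt m < r + 1 := Nat.sqrt_lt.mpr (by omega)
    omega
termination_by m - r
decreasing_by
  have h2 : r + 1 ≤ (r + 1) * (r + 1) := Nat.le_mul_of_pos_left _ (by omega)
  omega

theorem foldl_setFalse_size (L : List Int) (s : Array Bool) :
    (L.foldl (fun s j => s.set! j.toNat false) s).size = s.size := by
  induction L generalizing s with
  | nil => rfl
  | cons j t ih =>
    rw [List.foldl_cons, ih]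
    simp [Array.set!_eq_setIfInBounds, Array.size_setIfInBounds]

theorem foldl_setFalse_get (L : List Int) (s : Array Bool) (hL : ∀ j ∈ L, 0 ≤ j)
    (t : Nat) (ht : t < s.size) :
    ((L.foldl (fun s j => s.set! j.toNat false) s)[t]! = true ↔
      s[t]! = true ∧ (t : Int) ∉ L) := by
  induction L generalizing s with
  | nil => simp
  | cons j tl ih =>
    rw [List.foldl_cons]
    rw [ih (s.set! j.toNat false) (fun x hx => hL x (List.mem_cons_of_mem _ hx))
        (by simp [Array.set!_eq_setIfInBounds, Array.size_setIfInBounds, ht])]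
    have hj : 0 ≤ j := hL j List.mem_cons_self
    have hget : (s.set! j.toNat false)[t]! = if j.toNat = t then false else s[t]! := by
      rw [Array.set!_eq_setIfInBounds, Array.getElem!_eq_getD, Array.getD_eq_getD_getElem?,
        Array.getElem?_setIfInBounds]
      split
      · rename_i hjt
        rw [if_pos (hjt ▸ ht)]
        simp
      · rw [Array.getElem!_eq_getD, Array.getD_eq_getD_getElem?]
    rw [hget]
    constructor
    · rintro ⟨h1, h2⟩
      split at h1
      · simp at h1
      · rename_i hne
        exact ⟨h1, by
          simp only [List.mem_cons, not_or]
          exact ⟨fun he => hne (by omega), h2⟩⟩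
    · rintro ⟨h1, h2⟩
      simp only [List.mem_cons, not_or] at h2
      refine ⟨?_, h2.2⟩
      rw [if_neg (fun he => h2.1 (by omega))]
      exact h1

theorem pvMark_size (r : Nat) (i : Int) (s : Array Bool) : (pvMark r i s).size = s.size :=
  foldl_setFalse_size _ _

theorem pvMark_get (r : Nat) (i : Int) (hi : 2 ≤ i) (s : Array Bool) (hs : s.size = r + 1)
    (t : Nat) (ht : t < r + 1) :
    ((pvMark r i s)[t]! = true ↔ s[t]! = true ∧ ¬ (i * i ≤ (t : Int) ∧ i ∣ (t : Int))) := by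
  unfold pvMark
  rw [foldl_setFalse_get _ s
      (fun j hj => by
        have := (PySem.List.mem_pyRange_iff_of_pos (by omega) j).mp hj
        nlinarith [this.1])
      t (by omega)]
  have hmem : (t : Int) ∈ PySem.List.pyRange (i * i) ((r : Int) + 1) i ↔
      (i * i ≤ (t : Int) ∧ i ∣ (t : Int)) := by
    rw [PySem.List.mem_pyRange_iff_of_pos (by omega)]
    constructor
    · rintro ⟨h1, h2, h3⟩
      exact ⟨h1, (dvd_sub_left ⟨i, rfl⟩).mp h3⟩
    · rintro ⟨h1, h2⟩
      exact ⟨h1, by exact_mod_cast (by omega : (t:Int) < (r:Int)+1),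
        (dvd_sub_left ⟨i, rfl⟩).mpr h2⟩
  rw [hmem]

-- after processing i = a, a+1, …, r the entry t (t ≤ r) survives iff it survived in s and has no
-- divisor d ≥ a with d*d ≤ t
theorem pvSieveLoop_get (r : Nat) (a : Int) (ha : 2 ≤ a) (s : Array Bool) (hs : s.size = r + 1)
    (t : Nat) (ht : t < r + 1) :
    (((PySem.List.pyRange a ((r : Int) + 1) 1).foldl (fun s i => pvMark r i s) s)[t]! = true ↔
      s[t]! = true ∧ ¬ ∃ d : Int, a ≤ d ∧ d * d ≤ (t : Int) ∧ d ∣ (t : Int)) := by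
  by_cases hend : (r : Int) + 1 ≤ a
  · rw [PySem.List.pyRange_one_eq_nil hend, List.foldl_nil]
    have : ¬ ∃ d : Int, a ≤ d ∧ d * d ≤ (t : Int) ∧ d ∣ (t : Int) := by
      rintro ⟨d, h1, h2, -⟩
      have h3 : (t : Int) < (r : Int) + 1 := by exact_mod_cast (by omega : (t:Int) < (r:Int)+1)
      nlinarith
    simp [this]
  · rw [not_le] at hend
    rw [PySem.List.pyRange_one_cons hend, List.foldl_cons]
    rw [pvSieveLoop_get r (a + 1) (by omega) (pvMark r a s) (by rw [pvMark_size, hs]) t ht]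
    rw [pvMark_get r a ha s hs t ht]
    constructor
    · rintro ⟨⟨h1, h2⟩, h3⟩
      refine ⟨h1, ?_⟩
      rintro ⟨d, hd1, hd2, hd3⟩
      rcases eq_or_lt_of_le hd1 with he | hl
      · exact h2 ⟨he ▸ hd2, he ▸ hd3⟩
      · exact h3 ⟨d, by omega, hd2, hd3⟩
    · rintro ⟨h1, h2⟩
      exact ⟨⟨h1, fun hc => h2 ⟨a, le_refl a, hc.1, hc.2⟩⟩,
        fun ⟨d, hd1, hd2, hd3⟩ => h2 ⟨d, by omega, hd2, hd3⟩⟩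
termination_by ((r : Int) + 1 - a).toNat
decreasing_by omega

theorem pvSieve_get (r : Nat) (t : Nat) (ht : t < r + 1) :
    ((pvSieve r)[t]! = true ↔ ¬ ∃ d : Int, 2 ≤ d ∧ d * d ≤ (t : Int) ∧ d ∣ (t : Int)) := by
  unfold pvSieve
  rw [pvSieveLoop_get r 2 (by omega) _ (by simp) t ht]
  have : (Array.replicate (r + 1) true)[t]! = true := by
    rw [Array.getElem!_eq_getD, Array.getD_eq_getD_getElem?]
    simp [ht]
  simp [this]

-- membership in B's primes list
theorem mem_primes_iff (r : Nat) (p : Int) :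
    (p ∈ (PySem.List.pyRange 2 ((r : Int) + 1) 1).filter (fun i => (pvSieve r)[i.toNat]!) ↔
      2 ≤ p ∧ p ≤ (r : Int) ∧ ¬ ∃ d : Int, 2 ≤ d ∧ d * d ≤ p ∧ d ∣ p) := by
  rw [List.mem_filter, PySem.List.mem_pyRange_one]
  constructor
  · rintro ⟨⟨h1, h2⟩, h3⟩
    have hp : ((p.toNat : Nat) : Int) = p := Int.toNat_of_nonneg (by omega)
    rw [pvSieve_get r p.toNat (by omega)] at h3
    rw [hp] at h3
    exact ⟨h1, by omega, h3⟩
  · rintro ⟨h1, h2, h3⟩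
    have hp : ((p.toNat : Nat) : Int) = p := Int.toNat_of_nonneg (by omega)
    refine ⟨⟨h1, by omega⟩, ?_⟩
    rw [pvSieve_get r p.toNat (by omega), hp]
    exact h3

-- B's primes-only test agrees with "no divisor d ≥ 2 with d*d ≤ x" for 2 ≤ x ≤ m
theorem pvIsPrimeB_iff (m : Nat) (hm : 2 ≤ m) (x : Int) (_hx : 2 ≤ x) (hxm : x ≤ (m : Int)) :
    (pvIsPrimeB ((PySem.List.pyRange 2 (((pvSqrtLoop m 1 : Nat) : Int) + 1)  1).filter
        (fun i => (pvSieve (pvSqrtLoop m 1))[i.toNat]!)) x = true ↔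
      ¬ ∃ d : Int, 2 ≤ d ∧ d * d ≤ x ∧ d ∣ x) := by
  have hr : pvSqrtLoop m 1 = Nat.sqrt m := pvSqrtLoop_eq m 1 (by omega)
  unfold pvIsPrimeB
  simp only [List.all_eq_true, Bool.not_eq_eq_eq_not, Bool.not_true, Bool.and_eq_false_iff,
    decide_eq_false_iff_not, beq_eq_false_iff_ne, ne_eq]
  constructor
  · -- no prime p ≤ r with p*p ≤ x dividing x  ⇒  no d at all
    intro H
    rintro ⟨d, hd2, hdd, hdvd⟩
    -- take q = minFac d.toNat
    set q : Nat := d.toNat.minFac with hq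
    have hd0 : (0:Int) ≤ d := by omega
    have hdt : 2 ≤ d.toNat := by omega
    have hqp : Nat.Prime q := Nat.minFac_prime (by omega)
    have hq2 : 2 ≤ q := hqp.two_le
    have hqle : q ≤ d.toNat := Nat.minFac_le (by omega)
    have hqdvd_d : (q : Int) ∣ d := by
      have : (q : Int) ∣ (d.toNat : Int) := Int.natCast_dvd_natCast.mpr (Nat.minFac_dvd _)
      rwa [Int.toNat_of_nonneg hd0] at this
    have hqdvd : (q : Int) ∣ x := dvd_trans hqdvd_d hdvd
    have hqq : (q : Int) * q ≤ x := by
      have h1 : (q : Int) ≤ d := by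
        have := Int.toNat_of_nonneg hd0
        omega
      nlinarith
    -- q is in the primes list
    have hqmem : (q : Int) ∈ (PySem.List.pyRange 2 (((pvSqrtLoop m 1 : Nat) : Int) + 1) 1).filter
        (fun i => (pvSieve (pvSqrtLoop m 1))[i.toNat]!) := by
      rw [mem_primes_iff]
      refine ⟨by exact_mod_cast hq2, ?_, ?_⟩
      · rw [hr]
        have : q * q ≤ m := by
          have hxm' : x ≤ (m : Int) := hxm
          have : (q : Int) * q ≤ (m : Int) := le_trans hqq hxm'
          exact_mod_cast this
        exact_mod_cast Nat.le_sqrt.mpr this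
      · rintro ⟨e, he2, hee, hedvd⟩
        have he0 : (0:Int) ≤ e := by omega
        have : e.toNat ∣ q := by
          have : ((e.toNat : Nat) : Int) ∣ ((q : Nat) : Int) := by
            rwa [Int.toNat_of_nonneg he0]
          exact_mod_cast this
        rcases (Nat.Prime.eq_one_or_self_of_dvd hqp _ this) with h1 | h1
        · omega
        · -- e = q, but e*e ≤ q contradicts 2 ≤ e
          have : e = (q : Int) := by omega
          rw [this] at hee
          have : (q:Int) * q ≤ (q:Int) := hee
          nlinarith [hq2]
    have := H _ hqmem
    rcases this with h | h
    · exact h hqq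
    · exact h ((PySem.Int.mod_eq_zero_iff_dvd x (q:Int)).mpr hqdvd)
  · intro H p hp
    rw [mem_primes_iff] at hp
    by_cases hpp : p * p ≤ x
    · right
      intro hmod
      exact H ⟨p, hp.1, hpp, (PySem.Int.mod_eq_zero_iff_dvd x p).mp hmod⟩
    · left; exact hpp

theorem prime_cubes_spec' (numbers : List Int) :
    prime_cubes numbers = prime_cubes_alt numbers := by
  unfold prime_cubes prime_cubes_alt
  rcases hf : numbers.filter (fun x => decide (2 ≤ x)) with _ | ⟨c, rest⟩
  · -- no element ≥ 2: A's filter is empty too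
    have : numbers.filter (fun x => pvIsPrimeA x) = [] := by
      rw [List.filter_eq_nil_iff]
      intro x hx hpx
      have h2 := ((pvIsPrimeA_iff x).mp hpx).1
      have := List.filter_eq_nil_iff.mp hf x hx
      simp at this
      omega
    rw [this, List.map_nil]
  · show List.map (fun x => x ^ 3) (List.filter (fun x => pvIsPrimeA x) numbers)
      = List.foldl (fun acc x => if 2 ≤ x then
          (if pvIsPrimeB ((PySem.List.pyRange 2
                (((pvSqrtLoop (rest.foldl max c).toNat 1 : Nat) : Int) + 1) 1).filter
              (fun i => (pvSieve (pvSqrtLoop (rest.foldl max c).toNat 1))[i.toNat]!)) x = true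
           then acc ++ [x ^ 3] else acc) else acc) [] numbers
    set r := pvSqrtLoop (rest.foldl max c).toNat 1 with hrdef
    set primes := (PySem.List.pyRange 2 ((r : Int) + 1) 1).filter
        (fun i => (pvSieve r)[i.toNat]!) with hpr
    -- the fold of B is filter-then-map
    have hfun : (fun (acc : List Int) (x : Int) =>
          if 2 ≤ x then (if pvIsPrimeB primes x then acc ++ [x ^ 3] else acc) else acc)
        = (fun acc x => if (decide (2 ≤ x) && pvIsPrimeB primes x) = true
            then acc ++ [x ^ 3] else acc) := by
      funext acc x
      by_cases h1 : 2 ≤ x <;> by_cases h2 : pvIsPrimeB primes x <;> simp [h1, h2]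
    rw [hfun, PySem.List.foldl_append_if, List.nil_append]
    -- facts about c, rest and the maximum m
    have hc2 : 2 ≤ c := by
      have : c ∈ numbers.filter (fun x => decide (2 ≤ x)) := by
        rw [hf]; exact List.mem_cons_self
      simpa using (List.mem_filter.mp this).2
    have hmax := PySem.List.le_foldl_max rest c
    have hm2 : 2 ≤ (rest.foldl max c).toNat := by omega
    have hmc : ((rest.foldl max c).toNat : Int) = rest.foldl max c :=
      Int.toNat_of_nonneg (by omega)
    -- pointwise agreement of the two filters on the elements of numbers
    congr 1
    apply List.filter_congr
    intro x hx
    by_cases h2 : 2 ≤ x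
    · have hxf : x ∈ numbers.filter (fun y => decide (2 ≤ y)) :=
        List.mem_filter.mpr ⟨hx, by simpa⟩
      rw [hf] at hxf
      have hxm : x ≤ ((rest.foldl max c).toNat : Int) := by
        rw [hmc]
        rcases List.mem_cons.mp hxf with h | h
        · exact h ▸ hmax.1
        · exact hmax.2 x h
      have hB := pvIsPrimeB_iff (rest.foldl max c).toNat hm2 x h2 hxm
      apply Bool.coe_iff_coe.mp
      rw [pvIsPrimeA_iff]
      simp only [Bool.and_eq_true, decide_eq_true_eq]
      rw [← hrdef, ← hpr] at hB
      rw [hB]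
    · apply Bool.coe_iff_coe.mp
      rw [pvIsPrimeA_iff]
      simp [h2]

-- ===== VERDICT (by name: the statement is the Claim_ definition above) =====
theorem prime_cubes_spec : Claim_equal_prime_cubes := by
  intro numbers _
  unfold Spec_prime_cubes
  exact prime_cubes_spec' numbers
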